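-- pv_equiv track=rewrite | github.com/iarsenin/memory | src/eval/probes.py | _bucket_facts
-- ===== SOURCE A (Python) =====
-- def _successor_ids(facts: list[dict]) -> set[str]:
--     """Return fact_ids that are successors of another fact."""
--     return {f["superseded_by_id"] for f in facts if f.get("superseded_by_id")}
--
-- def _bucket_facts(facts: list[dict]) -> dict[str, list[dict]]:
--     succ = _successor_ids(facts)
--     return {
--         "stable": [
--             f for f in facts
--             if f["status"] == "active" and f["fact_id"] not in succ
--         ],
--         "updated": [
--             f for f in facts
--             if f["status"] == "active" and f["fact_id"] in succ
--         ],
--         "superseded": [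
--             f for f in facts if f["status"] == "superseded"
--         ],
--     }
-- ===== SOURCE B (Python) =====
-- def _successor_ids(facts):
--     """Return fact_ids that are successors of another fact."""
--     return {f["superseded_by_id"] for f in facts if f.get("superseded_by_id")}
--
-- def _bucket_facts(facts):
--     succ = _successor_ids(facts)
--     stable, updated, superseded = [], [], []
--     for f in facts:
--         status = f["status"]
--         if status == "active":
--             (updated if f["fact_id"] in succ else stable).append(f)
--         elif status == "superseded":
--             superseded.append(f)
--     return {"stable": stable, "updated": updated, "superseded": superseded}
-- ===== Notes on version B (the rewrite author's own statement) =====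
-- stated objective: simpler
-- what changed: The three independent filter passes over facts are replaced by a single loop that dispatches each fact into one of three pre-created lists (updated vs stable by successor-set membership, superseded by status); the successor-id set construction is kept.
import Mathlib
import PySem

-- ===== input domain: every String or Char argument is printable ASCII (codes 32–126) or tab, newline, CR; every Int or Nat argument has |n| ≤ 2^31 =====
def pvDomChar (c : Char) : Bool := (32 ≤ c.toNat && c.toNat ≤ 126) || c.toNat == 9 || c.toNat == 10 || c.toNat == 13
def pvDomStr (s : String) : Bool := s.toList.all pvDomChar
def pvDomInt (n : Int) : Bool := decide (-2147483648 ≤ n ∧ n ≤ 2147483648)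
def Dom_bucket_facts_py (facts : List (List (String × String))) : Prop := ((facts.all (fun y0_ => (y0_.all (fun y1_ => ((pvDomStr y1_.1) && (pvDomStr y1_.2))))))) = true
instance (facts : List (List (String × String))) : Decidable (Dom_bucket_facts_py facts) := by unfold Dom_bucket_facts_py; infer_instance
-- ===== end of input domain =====

-- B replaces A's three filter passes by one dispatch loop into three accumulators; same return value, 'simpler' objective.

-- ===== PORT A =====
-- f[k] / f.get(k): first-match lookup in the fact's association list
def pvGet? (f : List (String × String)) (k : String) : Option String :=
  (f.find? (fun p => p.1 == k)).map (·.2)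

-- _successor_ids: the set comprehension, in iteration order (membership-only use)
def pvSuccIds (facts : List (List (String × String))) : PySem.Set String :=
  facts.foldl
    (fun s f =>
      match pvGet? f "superseded_by_id" with
      | some v => if v ≠ "" then PySem.Set.add s v else s   -- truthiness: nonempty string
      | none => s)
    PySem.Set.empty

def bucket_facts_py (facts : List (List (String × String))) : List (String × List (List (String × String))) :=
  let succ := pvSuccIds facts
  [("stable", facts.filter (fun f =>
      ((pvGet? f "status").getD "" == "active") && !(PySem.Set.contains succ ((pvGet? f "fact_id").getD "")))),
   ("updated", facts.filter (fun f =>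
      ((pvGet? f "status").getD "" == "active") && PySem.Set.contains succ ((pvGet? f "fact_id").getD ""))),
   ("superseded", facts.filter (fun f => (pvGet? f "status").getD "" == "superseded"))]

-- ===== PORT B =====
def pvDispatch (succ : PySem.Set String)
    (acc : List (List (String × String)) × List (List (String × String)) × List (List (String × String)))
    (f : List (String × String)) :
    List (List (String × String)) × List (List (String × String)) × List (List (String × String)) :=
  let status := (pvGet? f "status").getD ""
  if status == "active" then
    if PySem.Set.contains succ ((pvGet? f "fact_id").getD "")
    then (acc.1, acc.2.1 ++ [f], acc.2.2)
    else (acc.1 ++ [f], acc.2.1, acc.2.2)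
  else if status == "superseded" then (acc.1, acc.2.1, acc.2.2 ++ [f])
  else acc

def bucket_facts_py_alt (facts : List (List (String × String))) : List (String × List (List (String × String))) :=
  let succ := pvSuccIds facts
  let acc := facts.foldl (pvDispatch succ) ([], [], [])
  [("stable", acc.1), ("updated", acc.2.1), ("superseded", acc.2.2)]

-- ===== PRECONDITION & SPEC =====
-- Pre_ excludes exactly the facts lists where Python A raises KeyError: a fact with no
-- "status" key, or an "active" fact with no "fact_id" key.
def Pre_bucket_facts_py (facts : List (List (String × String))) : Prop :=
  ∀ f ∈ facts, (pvGet? f "status").isSome ∧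
    (pvGet? f "status" = some "active" → (pvGet? f "fact_id").isSome)
instance (facts : List (List (String × String))) : Decidable (Pre_bucket_facts_py facts) := by
  unfold Pre_bucket_facts_py; infer_instance
def pvWitness_bucket_facts_py : (List (List (String × String))) :=
  [[("status", "active"), ("fact_id", "a")], [("status", "superseded"), ("fact_id", "b"), ("superseded_by_id", "a")]]

def Spec_bucket_facts_py (facts : List (List (String × String))) (out : List (String × List (List (String × String)))) : Prop := out = bucket_facts_py_alt facts
instance (facts : List (List (String × String))) (out : List (String × List (List (String × String)))) : Decidable (Spec_bucket_facts_py facts out) := by unfold Spec_bucket_facts_py; infer_instance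

-- ===== CLAIM (what is proved, stated in full; the proofs are below) =====
def Claim_equal_bucket_facts_py : Prop := ∀ (facts : List (List (String × String))), Dom_bucket_facts_py facts → Pre_bucket_facts_py facts → Spec_bucket_facts_py facts (bucket_facts_py facts)

-- ===== LEMMAS AND PROOFS =====
-- Loop invariant: the dispatch fold extends the three accumulators by exactly A's three filters.
theorem pvDispatch_foldl (succ : PySem.Set String) (facts : List (List (String × String)))
    (s u x : List (List (String × String))) :
    facts.foldl (pvDispatch succ) (s, u, x) =
      (s ++ facts.filter (fun f =>
          ((pvGet? f "status").getD "" == "active") && !(PySem.Set.contains succ ((pvGet? f "fact_id").getD ""))),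
       u ++ facts.filter (fun f =>
          ((pvGet? f "status").getD "" == "active") && PySem.Set.contains succ ((pvGet? f "fact_id").getD "")),
       x ++ facts.filter (fun f => (pvGet? f "status").getD "" == "superseded")) := by
  induction facts generalizing s u x with
  | nil => simp
  | cons f rest ih =>
    by_cases h1 : (pvGet? f "status").getD "" = "active"
    · by_cases h2 : ((pvGet? f "fact_id").getD "") ∈ succ
      · simp [pvDispatch, h1, h2, ih]
      · simp [pvDispatch, h1, h2, ih]
    · by_cases h3 : (pvGet? f "status").getD "" = "superseded"
      · simp [pvDispatch, h3, ih]
      · simp [pvDispatch, h1, h3, ih]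

-- ===== VERDICT (by name: the statement is the Claim_ definition above) =====
theorem bucket_facts_py_spec : Claim_equal_bucket_facts_py := by
  intro facts _ _
  unfold Spec_bucket_facts_py bucket_facts_py bucket_facts_py_alt
  simp [pvDispatch_foldl]
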